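-- pv_equiv track=rewrite | github.com/raulpenaguiao/project-euler | archive/Euler01__/Euler165/Euler165.py | CountTrueIntersections
-- ===== SOURCE A (Python) =====
-- def Det(mat):
--     ans = mat[0][0]*mat[1][1]*mat[2][2]+mat[0][1]*mat[1][2]*mat[2][0]+mat[0][2]*mat[1][0]*mat[2][1]
--     ans -= mat[0][0]*mat[1][2]*mat[2][1]+mat[0][1]*mat[1][0]*mat[2][2]+mat[0][2]*mat[1][1]*mat[2][0]
--     return ans
--
-- def isTrueIntersection(l1, l2):
--     a = Det([[l1[1], l1[3], l2[1]], [l1[2], l1[4], l2[2]], [1, 1, 1]])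
--     b = Det([[l1[1], l1[3], l2[3]], [l1[2], l1[4], l2[4]], [1, 1, 1]])
--     if a*b >= 0:
--         return False
--     c = Det([[l2[1], l2[3], l1[1]], [l2[2], l2[4], l1[2]], [1, 1, 1]])
--     d = Det([[l2[1], l2[3], l1[3]], [l2[2], l2[4], l1[4]], [1, 1, 1]])
--     if c*d >= 0:
--         return False
--     return True
--
-- def GCD(a, b):
--     if b == 0:
--         return a
--     return GCD(b, a%b)
--
-- def Reduce(l):
--     if(l[1] == 0):
--         raise Exception("Division by zero")
--     if l[0] > 0:
--         if l[1] > 0: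
--             d = GCD(l[0], l[1])
--             return [l[0]//d, l[1]//d]
--         if l[1] < 0:
--             d = GCD(l[0], -l[1])
--             return [-l[0]//d, -l[1]//d]
--     if l[0] < 0:
--         if l[1] > 0:
--             d = GCD(-l[0], l[1])
--             return [l[0]//d, l[1]//d]
--         if l[1] < 0:
--             d = GCD(-l[0], -l[1])
--             return [-l[0]//d, -l[1]//d]
--     return [0, 1]
--
-- def IntersectionPoint(l1, l2):
--     a = l1[2] - l1[4]
--     b = l2[2] - l2[4]
--     c = l1[3] - l1[1]
--     d = l2[3] - l2[1]
--     b1 = l1[3]*l1[2]-l1[1]*l1[4]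
--     b2 = l2[3]*l2[2]-l2[1]*l2[4]
--     return [ Reduce([d*b1-c*b2, a*d-b*c]) , Reduce([a*b2-b*b1, a*d-b*c])]
--
-- def DeleteCopiesRationalPoints(st):
--     if st == []:
--         return []
--     t = sorted(st)
--     ans = [t[0]]
--     for i in range(1, len(t)):
--         if not( t[i][0][0]*t[i-1][0][1] == t[i][0][1]*t[i-1][0][0]) or not(t[i][1][0]*t[i-1][1][1] == t[i][1][1]*t[i-1][1][0]) :
--             ans += [t[i]]
--     return ans
--
-- def CountTrueIntersections(lns):
--     l = len(lns)
--     ans = []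
--     for i in range(l):
--         for j in range(i):
--             if isTrueIntersection(lns[i], lns[j]):
--                 pt = IntersectionPoint(lns[i], lns[j])
--                 ans += [pt]
--     ans = DeleteCopiesRationalPoints(ans)
--     return len(ans)
-- ===== SOURCE B (Python) =====
-- def _CanonicalFraction(num, den):
--     # canonical form of num/den (den != 0): positive denominator, lowest terms, 0 -> (0, 1)
--     if den < 0:
--         num, den = -num, -den
--     a, b = abs(num), den
--     while b:
--         a, b = b, a % b
--     return (num // a, den // a)
--
-- def CountTrueIntersections(lns):
--     pts = set()
--     for i in range(len(lns)):
--         for j in range(i):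
--             l1, l2 = lns[i], lns[j]
--             x1, y1, x2, y2 = l1[1], l1[2], l1[3], l1[4]
--             u1, v1, u2, v2 = l2[1], l2[2], l2[3], l2[4]
--             s1 = (x2 - x1) * (v1 - y1) - (y2 - y1) * (u1 - x1)
--             s2 = (x2 - x1) * (v2 - y1) - (y2 - y1) * (u2 - x1)
--             if s1 * s2 >= 0:
--                 continue
--             s3 = (u2 - u1) * (y1 - v1) - (v2 - v1) * (x1 - u1)
--             s4 = (u2 - u1) * (y2 - v1) - (v2 - v1) * (x2 - u1)
--             if s3 * s4 >= 0:
--                 continue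
--             den = (y1 - y2) * (u2 - u1) - (v1 - v2) * (x2 - x1)
--             b1 = x2 * y1 - x1 * y2
--             b2 = u2 * v1 - u1 * v2
--             xn = (u2 - u1) * b1 - (x2 - x1) * b2
--             yn = (y1 - y2) * b2 - (v1 - v2) * b1
--             pts.add(_CanonicalFraction(xn, den) + _CanonicalFraction(yn, den))
--     return len(pts)
-- ===== Notes on version B (the rewrite author's own statement) =====
-- stated objective: simpler
-- what changed: B inserts each pair's canonical intersection key (reduced fractions with positive denominators) into a set and returns the set's size, eliminating A's DeleteCopiesRationalPoints entirely (no collected duplicate list, no sort, no adjacent cross-multiplication scan).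
import Mathlib
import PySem

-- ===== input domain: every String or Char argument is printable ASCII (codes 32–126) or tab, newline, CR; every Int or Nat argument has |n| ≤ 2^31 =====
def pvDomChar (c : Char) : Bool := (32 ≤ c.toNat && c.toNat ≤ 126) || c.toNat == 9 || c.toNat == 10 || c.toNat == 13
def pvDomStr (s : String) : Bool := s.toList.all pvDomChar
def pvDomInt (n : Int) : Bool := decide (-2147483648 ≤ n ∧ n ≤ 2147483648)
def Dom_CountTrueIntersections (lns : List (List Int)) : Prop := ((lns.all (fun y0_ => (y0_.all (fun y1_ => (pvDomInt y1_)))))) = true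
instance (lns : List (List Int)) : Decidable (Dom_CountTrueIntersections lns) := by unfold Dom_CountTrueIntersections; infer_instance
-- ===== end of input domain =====

-- B replaces A's collect-all / sort / adjacent-cross-compare deduplication by inserting each
-- canonical intersection key into a set and returning the set's size (no sort pass, no second scan).

-- Termination fact both Euclid loops cite: |a % b| < |b| for b ≠ 0 (Python mod).
theorem pvModNatAbsLt (a b : Int) (h : ¬ b = 0) : (PySem.Int.mod a b).natAbs < b.natAbs := by
  rcases lt_trichotomy b 0 with hb | hb | hb
  · have := PySem.Int.mod_neg_bounds a hb
    omega
  · exact absurd hb h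
  · have h1 := PySem.Int.mod_nonneg a hb
    have h2 := PySem.Int.mod_lt a hb
    omega

-- ===== PORT A =====
def pyDet (mat : List (List Int)) : Int :=
  -- mat[i][j]; exact: every call site passes a literal 3×3 matrix, so all indices are in range
  let g : Int → Int → Int := fun i j => PySem.List.pyGetD (PySem.List.pyGetD mat i []) j 0
  (g 0 0 * g 1 1 * g 2 2 + g 0 1 * g 1 2 * g 2 0 + g 0 2 * g 1 0 * g 2 1) -
    (g 0 0 * g 1 2 * g 2 1 + g 0 1 * g 1 0 * g 2 2 + g 0 2 * g 1 1 * g 2 0)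

def pyIsTrueIntersection (l1 l2 : List Int) : Bool :=
  let e : List Int → Int → Int := fun l i => PySem.List.pyGetD l i 0
  let a := pyDet [[e l1 1, e l1 3, e l2 1], [e l1 2, e l1 4, e l2 2], [1, 1, 1]]
  let b := pyDet [[e l1 1, e l1 3, e l2 3], [e l1 2, e l1 4, e l2 4], [1, 1, 1]]
  if a * b ≥ 0 then false
  else
    let c := pyDet [[e l2 1, e l2 3, e l1 1], [e l2 2, e l2 4, e l1 2], [1, 1, 1]]
    let d := pyDet [[e l2 1, e l2 3, e l1 3], [e l2 2, e l2 4, e l1 4], [1, 1, 1]]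
    if c * d ≥ 0 then false else true

def pyGCD (a b : Int) : Int :=
  if h : b = 0 then a else pyGCD b (PySem.Int.mod a b)
termination_by b.natAbs
decreasing_by exact pvModNatAbsLt a b h

def pyReduce (l : List Int) : List Int :=
  let l0 := PySem.List.pyGetD l 0 0
  let l1 := PySem.List.pyGetD l 1 0
  -- Python raises Exception("Division by zero") when l[1] = 0.  That branch is unreachable
  -- from CountTrueIntersections: the denominator passed here is nonzero whenever
  -- isTrueIntersection holds (proved in den_ne_zero below), so its value is arbitrary.
  if l1 = 0 then [0, 0]
  else if l0 > 0 then
    if l1 > 0 then let d := pyGCD l0 l1; [PySem.Int.floordiv l0 d, PySem.Int.floordiv l1 d]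
    else let d := pyGCD l0 (-l1); [PySem.Int.floordiv (-l0) d, PySem.Int.floordiv (-l1) d]
  else if l0 < 0 then
    if l1 > 0 then let d := pyGCD (-l0) l1; [PySem.Int.floordiv l0 d, PySem.Int.floordiv l1 d]
    else let d := pyGCD (-l0) (-l1); [PySem.Int.floordiv (-l0) d, PySem.Int.floordiv (-l1) d]
  else [0, 1]

def pyIntersectionPoint (l1 l2 : List Int) : List (List Int) :=
  let e : List Int → Int → Int := fun l i => PySem.List.pyGetD l i 0
  let a := e l1 2 - e l1 4
  let b := e l2 2 - e l2 4
  let c := e l1 3 - e l1 1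
  let d := e l2 3 - e l2 1
  let b1 := e l1 3 * e l1 2 - e l1 1 * e l1 4
  let b2 := e l2 3 * e l2 2 - e l2 1 * e l2 4
  [pyReduce [d * b1 - c * b2, a * d - b * c], pyReduce [a * b2 - b * b1, a * d - b * c]]

-- the loop condition of DeleteCopiesRationalPoints, verbatim:
-- not(x[0][0]*y[0][1] == x[0][1]*y[0][0]) or not(x[1][0]*y[1][1] == x[1][1]*y[1][0])
def crossNe (x y : List (List Int)) : Bool :=
  (PySem.List.pyGetD (PySem.List.pyGetD x 0 []) 0 0 * PySem.List.pyGetD (PySem.List.pyGetD y 0 []) 1 0 !=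
     PySem.List.pyGetD (PySem.List.pyGetD x 0 []) 1 0 * PySem.List.pyGetD (PySem.List.pyGetD y 0 []) 0 0) ||
  (PySem.List.pyGetD (PySem.List.pyGetD x 1 []) 0 0 * PySem.List.pyGetD (PySem.List.pyGetD y 1 []) 1 0 !=
     PySem.List.pyGetD (PySem.List.pyGetD x 1 []) 1 0 * PySem.List.pyGetD (PySem.List.pyGetD y 1 []) 0 0)

def pyDeleteCopiesRationalPoints (st : List (List (List Int))) : List (List (List Int)) :=
  if st = [] then []
  else
    let t := PySem.List.sorted st (fun x => x) false
    (PySem.List.pyRange 1 (t.length : Int) 1).foldl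
      (fun ans i =>
        if crossNe (PySem.List.pyGetD t i []) (PySem.List.pyGetD t (i - 1) []) = true
        then ans ++ [PySem.List.pyGetD t i []] else ans)
      [PySem.List.pyGetD t 0 []]

def CountTrueIntersections (lns : List (List Int)) : Int :=
  let l : Int := (lns.length : Int)
  let ans : List (List (List Int)) :=
    (PySem.List.pyRange 0 l 1).foldl
      (fun ans i =>
        (PySem.List.pyRange 0 i 1).foldl
          (fun ans j =>
            if pyIsTrueIntersection (PySem.List.pyGetD lns i []) (PySem.List.pyGetD lns j []) = true
            then ans ++ [pyIntersectionPoint (PySem.List.pyGetD lns i []) (PySem.List.pyGetD lns j [])]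
            else ans)
          ans)
      []
  ((pyDeleteCopiesRationalPoints ans).length : Int)

-- ===== PORT B =====
def altGcdLoop (a b : Int) : Int :=
  -- Source B: "a, b = abs(num), den; while b: a, b = b, a % b"
  if h : b = 0 then a else altGcdLoop b (PySem.Int.mod a b)
termination_by b.natAbs
decreasing_by exact pvModNatAbsLt a b h

def altCanonicalFraction (num den : Int) : Int × Int :=
  let p : Int × Int := if den < 0 then (-num, -den) else (num, den)
  let g := altGcdLoop (p.1.natAbs : Int) p.2
  (PySem.Int.floordiv p.1 g, PySem.Int.floordiv p.2 g)

def CountTrueIntersections_alt (lns : List (List Int)) : Int :=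
  let pts : PySem.Set (Int × Int × Int × Int) :=
    (PySem.List.pyRange 0 (lns.length : Int) 1).foldl
      (fun pts i =>
        (PySem.List.pyRange 0 i 1).foldl
          (fun pts j =>
            let l1 := PySem.List.pyGetD lns i []
            let l2 := PySem.List.pyGetD lns j []
            let x1 := PySem.List.pyGetD l1 1 0
            let y1 := PySem.List.pyGetD l1 2 0
            let x2 := PySem.List.pyGetD l1 3 0
            let y2 := PySem.List.pyGetD l1 4 0
            let u1 := PySem.List.pyGetD l2 1 0
            let v1 := PySem.List.pyGetD l2 2 0
            let u2 := PySem.List.pyGetD l2 3 0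
            let v2 := PySem.List.pyGetD l2 4 0
            let s1 := (x2 - x1) * (v1 - y1) - (y2 - y1) * (u1 - x1)
            let s2 := (x2 - x1) * (v2 - y1) - (y2 - y1) * (u2 - x1)
            if s1 * s2 ≥ 0 then pts
            else
              let s3 := (u2 - u1) * (y1 - v1) - (v2 - v1) * (x1 - u1)
              let s4 := (u2 - u1) * (y2 - v1) - (v2 - v1) * (x2 - u1)
              if s3 * s4 ≥ 0 then pts
              else
                let den := (y1 - y2) * (u2 - u1) - (v1 - v2) * (x2 - x1)
                let b1 := x2 * y1 - x1 * y2
                let b2 := u2 * v1 - u1 * v2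
                let xn := (u2 - u1) * b1 - (x2 - x1) * b2
                let yn := (y1 - y2) * b2 - (v1 - v2) * b1
                let fx := altCanonicalFraction xn den
                let fy := altCanonicalFraction yn den
                PySem.Set.add pts (fx.1, fx.2, fy.1, fy.2))
          pts)
      []
  PySem.Set.len pts

-- ===== PRECONDITION & SPEC =====
-- Pre_ excludes exactly the inputs on which Python A raises IndexError: two or more segment
-- records while some record has fewer than 5 entries (indices 1..4 of every record are read
-- as soon as there is at least one pair).
def Pre_CountTrueIntersections (lns : List (List Int)) : Prop :=
  lns.length ≤ 1 ∨ ∀ l ∈ lns, 5 ≤ l.length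
instance (lns : List (List Int)) : Decidable (Pre_CountTrueIntersections lns) := by
  unfold Pre_CountTrueIntersections; infer_instance

def pvWitness_CountTrueIntersections : List (List Int) := [[1, 0, 0, 2, 2], [2, 0, 2, 2, 0]]

def Spec_CountTrueIntersections (lns : List (List Int)) (out : Int) : Prop := out = CountTrueIntersections_alt lns
instance (lns : List (List Int)) (out : Int) : Decidable (Spec_CountTrueIntersections lns out) := by unfold Spec_CountTrueIntersections; infer_instance

-- ===== CLAIM (what is proved, stated in full; the proofs are below) =====
def Claim_equal_CountTrueIntersections : Prop := ∀ (lns : List (List Int)), Dom_CountTrueIntersections lns → Pre_CountTrueIntersections lns → Spec_CountTrueIntersections lns (CountTrueIntersections lns)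

-- ===== LEMMAS AND PROOFS =====

-- ---- proof-side vocabulary ----

-- B's canonical key for the pair (l1, l2), as a standalone function
def ptKey (l1 l2 : List Int) : Int × Int × Int × Int :=
  let x1 := PySem.List.pyGetD l1 1 0
  let y1 := PySem.List.pyGetD l1 2 0
  let x2 := PySem.List.pyGetD l1 3 0
  let y2 := PySem.List.pyGetD l1 4 0
  let u1 := PySem.List.pyGetD l2 1 0
  let v1 := PySem.List.pyGetD l2 2 0
  let u2 := PySem.List.pyGetD l2 3 0
  let v2 := PySem.List.pyGetD l2 4 0
  let den := (y1 - y2) * (u2 - u1) - (v1 - v2) * (x2 - x1)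
  let b1 := x2 * y1 - x1 * y2
  let b2 := u2 * v1 - u1 * v2
  let xn := (u2 - u1) * b1 - (x2 - x1) * b2
  let yn := (y1 - y2) * b2 - (v1 - v2) * b1
  let fx := altCanonicalFraction xn den
  let fy := altCanonicalFraction yn den
  (fx.1, fx.2, fy.1, fy.2)

-- rendering of a key as A's point record; injective
def injPt (k : Int × Int × Int × Int) : List (List Int) := [[k.1, k.2.1], [k.2.2.1, k.2.2.2]]

-- the true-intersection test as a Prop
abbrev TI (l1 l2 : List Int) : Prop :=
  let x1 := PySem.List.pyGetD l1 1 0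
  let y1 := PySem.List.pyGetD l1 2 0
  let x2 := PySem.List.pyGetD l1 3 0
  let y2 := PySem.List.pyGetD l1 4 0
  let u1 := PySem.List.pyGetD l2 1 0
  let v1 := PySem.List.pyGetD l2 2 0
  let u2 := PySem.List.pyGetD l2 3 0
  let v2 := PySem.List.pyGetD l2 4 0
  ((x2 - x1) * (v1 - y1) - (y2 - y1) * (u1 - x1)) * ((x2 - x1) * (v2 - y1) - (y2 - y1) * (u2 - x1)) < 0 ∧
  ((u2 - u1) * (y1 - v1) - (v2 - v1) * (x1 - u1)) * ((u2 - u1) * (y2 - v1) - (v2 - v1) * (x2 - u1)) < 0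

-- the (lns[i], lns[j]) pairs both double loops keep, in visiting order
def pairsOf (lns : List (List Int)) : List (List Int × List Int) :=
  (PySem.List.pyRange 0 (lns.length : Int) 1).flatMap (fun i =>
    ((PySem.List.pyRange 0 i 1).filter (fun j =>
        pyIsTrueIntersection (PySem.List.pyGetD lns i []) (PySem.List.pyGetD lns j []))).map
      (fun j => (PySem.List.pyGetD lns i [], PySem.List.pyGetD lns j [])))

-- number of adjacent pairs the scan of DeleteCopiesRationalPoints keeps
def adjCount (K : List (List Int) → List (List Int) → Bool) :
    List (List Int) → List (List (List Int)) → Nat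
  | _, [] => 0
  | prev, z :: zs => (if K z prev then 1 else 0) + adjCount K z zs

-- canonical point record: two fractions in lowest terms with positive denominators
def IsCanon (v : List (List Int)) : Prop :=
  ∃ a b c d : Int, v = [[a, b], [c, d]] ∧ 0 < b ∧ 0 < d ∧ Int.gcd a b = 1 ∧ Int.gcd c d = 1

-- ---- gcd arithmetic ----

theorem altGcdLoop_eq_pyGCD : ∀ (a b : Int), altGcdLoop a b = pyGCD a b := by
  have H : ∀ (n : Nat) (b : Int), b.natAbs = n → ∀ a, altGcdLoop a b = pyGCD a b := by
    intro n
    induction n using Nat.strong_induction_on with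
    | _ n ih =>
      intro b hb a
      rw [altGcdLoop, pyGCD]
      split
      · rfl
      · next h => exact ih _ (hb ▸ pvModNatAbsLt a b h) _ rfl _
  exact fun a b => H b.natAbs b rfl a

theorem gcd_emod (a b : Int) : Int.gcd b (a % b) = Int.gcd a b := by
  apply Nat.dvd_antisymm
  · have h1 : (↑(Int.gcd b (a % b)) : Int) ∣ b := Int.gcd_dvd_left _ _
    have h2 : (↑(Int.gcd b (a % b)) : Int) ∣ a % b := Int.gcd_dvd_right _ _
    have h3 : (↑(Int.gcd b (a % b)) : Int) ∣ a := by
      have h4 := dvd_add (h1.mul_right (a / b)) h2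
      rwa [Int.ediv_add_emod] at h4
    exact Int.dvd_gcd h3 h1
  · have h1 : (↑(Int.gcd a b) : Int) ∣ a := Int.gcd_dvd_left _ _
    have h2 : (↑(Int.gcd a b) : Int) ∣ b := Int.gcd_dvd_right _ _
    have h3 : (↑(Int.gcd a b) : Int) ∣ a % b := by
      rw [Int.emod_def]
      exact dvd_sub h1 (h2.mul_right _)
    exact Int.dvd_gcd h2 h3

theorem pyGCD_eq_gcd : ∀ (b a : Int), 0 ≤ a → 0 ≤ b → pyGCD a b = (Int.gcd a b : Int) := by
  have H : ∀ (n : Nat) (b : Int), b.natAbs = n → ∀ a, 0 ≤ a → 0 ≤ b → pyGCD a b = (Int.gcd a b : Int) := by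
    intro n
    induction n using Nat.strong_induction_on with
    | _ n ih =>
      intro b hb a ha hb0
      rw [pyGCD]
      split
      · next h => subst h; rw [Int.gcd_zero_right]; omega
      · next h =>
        have hpos : 0 < b := lt_of_le_of_ne hb0 (Ne.symm h)
        rw [PySem.Int.mod_eq_emod_of_pos hpos]
        have hlt : (a % b).natAbs < n := by
          have h1 := Int.emod_nonneg a h
          have h2 := Int.emod_lt_of_pos a hpos
          omega
        rw [ih _ hlt (a % b) rfl b hb0 (Int.emod_nonneg a h), gcd_emod]
  exact fun b a ha hb => H b.natAbs b rfl a ha hb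

theorem altGcdLoop_zero (b : Int) (h : 0 < b) : altGcdLoop 0 b = b := by
  rw [altGcdLoop]
  rw [dif_neg (by omega)]
  have hm : PySem.Int.mod 0 b = 0 := by
    rw [PySem.Int.mod_eq_emod_of_pos h]; simp
  rw [hm, altGcdLoop]
  simp

-- A's Reduce and B's canonical fraction agree whenever the denominator is nonzero
theorem reduce_eq_canon (num den : Int) (h : den ≠ 0) :
    pyReduce [num, den] = [(altCanonicalFraction num den).1, (altCanonicalFraction num den).2] := by
  have e0 : PySem.List.pyGetD [num, den] 0 0 = num := by
    rw [PySem.List.pyGetD_ofNat']; rfl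
  have e1 : PySem.List.pyGetD [num, den] 1 0 = den := by
    rw [PySem.List.pyGetD_ofNat']; rfl
  unfold pyReduce altCanonicalFraction
  rw [e0, e1]
  rcases lt_trichotomy num 0 with hn | hn | hn <;> rcases lt_trichotomy den 0 with hd | hd | hd
  all_goals first
  | exact absurd hd h
  | (try subst hn)
  all_goals simp only [if_neg (by omega : ¬ den = 0)]
  · rw [if_neg (by omega : ¬ num > 0), if_pos hn, if_neg (by omega : ¬ den > 0), if_pos hd]
    have hA : (((-num).natAbs : Int)) = -num := by omega
    simp only [altGcdLoop_eq_pyGCD, hA]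
  · rw [if_neg (by omega : ¬ num > 0), if_pos hn, if_pos hd, if_neg (by omega : ¬ den < 0)]
    have hA : ((num.natAbs : Int)) = -num := by omega
    simp only [altGcdLoop_eq_pyGCD, hA]
  · rw [if_neg (by omega : ¬ (0:Int) > 0), if_neg (by omega : ¬ (0:Int) < 0), if_pos hd]
    have hg : altGcdLoop (((0:Int).natAbs : Int)) (-den) = -den := by
      simpa using altGcdLoop_zero (-den) (by omega)
    simp only [neg_zero, hg]
    rw [PySem.Int.floordiv_eq_ediv_of_pos (by omega), PySem.Int.floordiv_eq_ediv_of_pos (by omega)]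
    rw [Int.zero_ediv, Int.ediv_self (by omega)]
  · rw [if_neg (by omega : ¬ (0:Int) > 0), if_neg (by omega : ¬ (0:Int) < 0), if_neg (by omega : ¬ den < 0)]
    have hg : altGcdLoop (((0:Int).natAbs : Int)) den = den := by
      simpa using altGcdLoop_zero den hd
    simp only [hg]
    rw [PySem.Int.floordiv_eq_ediv_of_pos hd, PySem.Int.floordiv_eq_ediv_of_pos hd]
    rw [Int.zero_ediv, Int.ediv_self (by omega)]
  · rw [if_pos hn, if_neg (by omega : ¬ den > 0), if_pos hd]
    have hA : (((-num).natAbs : Int)) = num := by omega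
    simp only [altGcdLoop_eq_pyGCD, hA]
  · rw [if_pos hn, if_pos hd, if_neg (by omega : ¬ den < 0)]
    have hA : ((num.natAbs : Int)) = num := by omega
    simp only [altGcdLoop_eq_pyGCD, hA]

theorem canonFraction (num den : Int) (h : den ≠ 0) :
    0 < (altCanonicalFraction num den).2 ∧
      Int.gcd (altCanonicalFraction num den).1 (altCanonicalFraction num den).2 = 1 := by
  unfold altCanonicalFraction
  rcases lt_trichotomy den 0 with hd | hd | hd
  case inr.inl => exact absurd hd h
  all_goals
    first
    | rw [if_pos hd]
    | rw [if_neg (by omega : ¬ den < 0)]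
  all_goals
    simp only
  · rcases eq_or_ne num 0 with rfl | hn
    · have hg : altGcdLoop (((-(0:Int)).natAbs : Int)) (-den) = -den := by
        simpa using altGcdLoop_zero (-den) (by omega)
      rw [hg, PySem.Int.floordiv_eq_ediv_of_pos (by omega), PySem.Int.floordiv_eq_ediv_of_pos (by omega)]
      simp [Int.ediv_self (by omega : (-den) ≠ 0)]
    · have hA : (((-num).natAbs : Int)) = ((num.natAbs : Int)) := by omega
      rw [altGcdLoop_eq_pyGCD, hA,
        pyGCD_eq_gcd _ _ (by positivity) (by omega)]
      have hgd : Int.gcd ((num.natAbs : Int)) (-den) = Int.gcd (-num) (-den) := by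
        rw [Int.gcd_def, Int.gcd_def]
        simp [Int.natAbs_abs]
      rw [hgd]
      set G := Int.gcd (-num) (-den) with hGdef
      have hG : 0 < (G : Int) := by
        have : G ≠ 0 := by
          rw [hGdef]
          simp [Int.gcd_eq_zero_iff]
          omega
        positivity
      rw [PySem.Int.floordiv_eq_ediv_of_pos hG, PySem.Int.floordiv_eq_ediv_of_pos hG]
      constructor
      · have hdvd : (G : Int) ∣ -den := Int.gcd_dvd_right _ _
        obtain ⟨k, hk⟩ := hdvd
        rw [hk, Int.mul_ediv_cancel_left _ (by omega)]
        nlinarith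
      · exact Int.gcd_div_gcd_div_gcd (by exact_mod_cast hG)
  · rcases eq_or_ne num 0 with rfl | hn
    · have hg : altGcdLoop ((((0:Int)).natAbs : Int)) den = den := by
        simpa using altGcdLoop_zero den hd
      rw [hg, PySem.Int.floordiv_eq_ediv_of_pos (by omega), PySem.Int.floordiv_eq_ediv_of_pos (by omega)]
      simp [Int.ediv_self (by omega : den ≠ 0)]
    · rw [altGcdLoop_eq_pyGCD,
        pyGCD_eq_gcd _ _ (by positivity) (by omega)]
      have hgd : Int.gcd ((num.natAbs : Int)) den = Int.gcd num den := by
        rw [Int.gcd_def, Int.gcd_def]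
        simp [Int.natAbs_abs]
      rw [hgd]
      set G := Int.gcd num den with hGdef
      have hG : 0 < (G : Int) := by
        have : G ≠ 0 := by
          rw [hGdef]
          simp [Int.gcd_eq_zero_iff]
          omega
        positivity
      rw [PySem.Int.floordiv_eq_ediv_of_pos hG, PySem.Int.floordiv_eq_ediv_of_pos hG]
      constructor
      · have hdvd : (G : Int) ∣ den := Int.gcd_dvd_right _ _
        obtain ⟨k, hk⟩ := hdvd
        rw [hk, Int.mul_ediv_cancel_left _ (by omega)]
        nlinarith
      · exact Int.gcd_div_gcd_div_gcd (by exact_mod_cast hG)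

-- two canonical fractions that cross-multiply equal are componentwise equal
theorem frac_inj {p q p' q' : Int} (hq : 0 < q) (hq' : 0 < q')
    (hc : Int.gcd p q = 1) (hc' : Int.gcd p' q' = 1) (h : p * q' = q * p') :
    p = p' ∧ q = q' := by
  have hcop : IsCoprime p q := Int.isCoprime_iff_gcd_eq_one.mpr hc
  have hcop' : IsCoprime p' q' := Int.isCoprime_iff_gcd_eq_one.mpr hc'
  have hdq : q ∣ q' := by
    have h1 : q ∣ p * q' := ⟨p', h⟩
    exact (hcop.symm).dvd_of_dvd_mul_left h1
  have hdq' : q' ∣ q := by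
    have h1 : q' ∣ q * p' := ⟨p, by rw [← h]; ring⟩
    exact (hcop'.symm).dvd_of_dvd_mul_right h1
  have hqq : q = q' := Int.dvd_antisymm (by omega) (by omega) hdq hdq'
  subst hqq
  refine ⟨?_, rfl⟩
  have h2 : p * q = p' * q := by rw [h]; ring
  exact mul_right_cancel₀ (by omega : q ≠ 0) h2

-- ---- correspondence of the two tests and the two point values ----

theorem det_cross (x1 y1 x2 y2 px py : Int) :
    pyDet [[x1, x2, px], [y1, y2, py], [1, 1, 1]] = (x2 - x1) * (py - y1) - (y2 - y1) * (px - x1) := by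
  unfold pyDet
  simp only [PySem.List.pyGetD_ofNat', List.getD_cons_zero, List.getD_cons_succ]
  norm_num [List.getD]
  ring

theorem test_eq (l1 l2 : List Int) : pyIsTrueIntersection l1 l2 = decide (TI l1 l2) := by
  simp only [pyIsTrueIntersection, TI, det_cross]
  set x1 := PySem.List.pyGetD l1 1 0
  set y1 := PySem.List.pyGetD l1 2 0
  set x2 := PySem.List.pyGetD l1 3 0
  set y2 := PySem.List.pyGetD l1 4 0
  set u1 := PySem.List.pyGetD l2 1 0
  set v1 := PySem.List.pyGetD l2 2 0
  set u2 := PySem.List.pyGetD l2 3 0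
  set v2 := PySem.List.pyGetD l2 4 0
  split_ifs with h1 h2
  · symm
    simp only [decide_eq_false_iff_not]
    intro hc
    exact absurd hc.1 (not_lt.mpr h1)
  · symm
    simp only [decide_eq_false_iff_not]
    intro hc
    exact absurd hc.2 (not_lt.mpr h2)
  · symm
    simp only [decide_eq_true_eq]
    exact ⟨by omega, by omega⟩

-- the intersection denominator is nonzero for a true intersection
-- (it equals the difference of the two opposite-sign orientation values)
theorem den_ne_zero (l1 l2 : List Int) (h : TI l1 l2) :
    ((PySem.List.pyGetD l1 2 0 - PySem.List.pyGetD l1 4 0) * (PySem.List.pyGetD l2 3 0 - PySem.List.pyGetD l2 1 0) -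
      (PySem.List.pyGetD l2 2 0 - PySem.List.pyGetD l2 4 0) * (PySem.List.pyGetD l1 3 0 - PySem.List.pyGetD l1 1 0)) ≠ 0 := by
  simp only [TI] at h
  set x1 := PySem.List.pyGetD l1 1 0
  set y1 := PySem.List.pyGetD l1 2 0
  set x2 := PySem.List.pyGetD l1 3 0
  set y2 := PySem.List.pyGetD l1 4 0
  set u1 := PySem.List.pyGetD l2 1 0
  set v1 := PySem.List.pyGetD l2 2 0
  set u2 := PySem.List.pyGetD l2 3 0
  set v2 := PySem.List.pyGetD l2 4 0
  obtain ⟨h1, -⟩ := h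
  intro h0
  have hs : ((x2 - x1) * (v2 - y1) - (y2 - y1) * (u2 - x1)) = ((x2 - x1) * (v1 - y1) - (y2 - y1) * (u1 - x1)) := by
    nlinarith [h0]
  rw [hs] at h1
  nlinarith [sq_nonneg ((x2 - x1) * (v1 - y1) - (y2 - y1) * (u1 - x1))]

theorem point_eq (l1 l2 : List Int) (h : TI l1 l2) :
    pyIntersectionPoint l1 l2 = injPt (ptKey l1 l2) := by
  have hden := den_ne_zero l1 l2 h
  simp only [pyIntersectionPoint, injPt, ptKey]
  rw [reduce_eq_canon _ _ hden, reduce_eq_canon _ _ hden]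

theorem point_canon (l1 l2 : List Int) (h : TI l1 l2) : IsCanon (injPt (ptKey l1 l2)) := by
  have hden := den_ne_zero l1 l2 h
  simp only [injPt, ptKey]
  refine ⟨_, _, _, _, rfl, ?_, ?_, ?_, ?_⟩
  · exact (canonFraction _ _ hden).1
  · exact (canonFraction _ _ hden).1
  · exact (canonFraction _ _ hden).2
  · exact (canonFraction _ _ hden).2

theorem injPt_injective : Function.Injective injPt := by
  rintro ⟨a1, a2, a3, a4⟩ ⟨b1, b2, b3, b4⟩ h
  simp only [injPt, List.cons.injEq, and_true] at h
  obtain ⟨⟨h1, h2⟩, h3, h4⟩ := h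
  simp_all

theorem crossNe_iff {x y : List (List Int)} (hx : IsCanon x) (hy : IsCanon y) :
    crossNe x y = true ↔ x ≠ y := by
  obtain ⟨p, q, r, s, rfl, hq, hs, hcq, hcs⟩ := hx
  obtain ⟨p', q', r', s', rfl, hq', hs', hcq', hcs'⟩ := hy
  have hred : crossNe [[p, q], [r, s]] [[p', q'], [r', s']] = true ↔
      (p * q' ≠ q * p' ∨ r * s' ≠ s * r') := by
    unfold crossNe
    simp only [PySem.List.pyGetD_ofNat', List.getD_cons_zero, List.getD_cons_succ]
    norm_num [List.getD]
  rw [hred]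
  constructor
  · rintro (hne | hne) heq
    · simp only [List.cons.injEq, and_true] at heq
      obtain ⟨⟨e1, e2⟩, -⟩ := heq
      exact hne (by rw [e1, e2]; ring)
    · simp only [List.cons.injEq, and_true] at heq
      obtain ⟨-, e3, e4⟩ := heq
      exact hne (by rw [e3, e4]; ring)
  · intro hne
    by_contra hcon
    simp only [not_or, not_not] at hcon
    obtain ⟨e1, e2⟩ := hcon
    obtain ⟨ep, eq⟩ := frac_inj hq hq' hcq hcq' e1
    obtain ⟨er, es⟩ := frac_inj hs hs' hcs hcs' e2
    exact hne (by rw [ep, eq, er, es])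

-- ---- loop shapes: both loops enumerate pairsOf ----

theorem A_ans_eq (lns : List (List Int)) :
    CountTrueIntersections lns =
      ((pyDeleteCopiesRationalPoints ((pairsOf lns).map (fun p => pyIntersectionPoint p.1 p.2))).length : Int) := by
  simp only [CountTrueIntersections]
  congr 2
  have hinner : ∀ (i : Int) (acc : List (List (List Int))),
      (PySem.List.pyRange 0 i 1).foldl
        (fun ans j =>
          if pyIsTrueIntersection (PySem.List.pyGetD lns i []) (PySem.List.pyGetD lns j []) = true
          then ans ++ [pyIntersectionPoint (PySem.List.pyGetD lns i []) (PySem.List.pyGetD lns j [])]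
          else ans) acc
      = acc ++ ((PySem.List.pyRange 0 i 1).filter
            (fun j => pyIsTrueIntersection (PySem.List.pyGetD lns i []) (PySem.List.pyGetD lns j []))).map
          (fun j => pyIntersectionPoint (PySem.List.pyGetD lns i []) (PySem.List.pyGetD lns j [])) :=
    fun i acc => PySem.List.foldl_append_if _ _ _ _
  simp only [hinner]
  rw [PySem.List.foldl_append_eq_flatMap]
  simp only [pairsOf, List.map_flatMap, List.map_map, List.nil_append]
  rfl

theorem foldl_add_if {α β : Type} [BEq β] (p : α → Bool) (f : α → β) :
    ∀ (l : List α) (s : PySem.Set β),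
      l.foldl (fun s x => if p x = true then PySem.Set.add s (f x) else s) s
        = PySem.Set.update s ((l.filter p).map f) := by
  intro l
  induction l with
  | nil => intro s; simp [PySem.Set.update]
  | cons x xs ih =>
    intro s
    by_cases h : p x = true
    · simp [h, ih, PySem.Set.update_cons]
    · simp [h, ih]

theorem foldl_update_flatMap {α β : Type} [BEq β] (g : α → List β) :
    ∀ (l : List α) (s : PySem.Set β),
      l.foldl (fun s i => PySem.Set.update s (g i)) s = PySem.Set.update s (l.flatMap g) := by
  intro l
  induction l with
  | nil => intro s; simp [PySem.Set.update]
  | cons x xs ih =>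
    intro s
    simp only [List.foldl_cons, List.flatMap_cons]
    rw [ih, PySem.Set.update_append]

theorem B_pts_eq (lns : List (List Int)) :
    CountTrueIntersections_alt lns =
      PySem.Set.len (PySem.Set.ofList ((pairsOf lns).map (fun p => ptKey p.1 p.2))) := by
  simp only [CountTrueIntersections_alt]
  have hbody : ∀ (i : Int),
      (fun (pts : PySem.Set (Int × Int × Int × Int)) (j : Int) =>
        let l1 := PySem.List.pyGetD lns i []
        let l2 := PySem.List.pyGetD lns j []
        let x1 := PySem.List.pyGetD l1 1 0
        let y1 := PySem.List.pyGetD l1 2 0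
        let x2 := PySem.List.pyGetD l1 3 0
        let y2 := PySem.List.pyGetD l1 4 0
        let u1 := PySem.List.pyGetD l2 1 0
        let v1 := PySem.List.pyGetD l2 2 0
        let u2 := PySem.List.pyGetD l2 3 0
        let v2 := PySem.List.pyGetD l2 4 0
        let s1 := (x2 - x1) * (v1 - y1) - (y2 - y1) * (u1 - x1)
        let s2 := (x2 - x1) * (v2 - y1) - (y2 - y1) * (u2 - x1)
        if s1 * s2 ≥ 0 then pts
        else
          let s3 := (u2 - u1) * (y1 - v1) - (v2 - v1) * (x1 - u1)
          let s4 := (u2 - u1) * (y2 - v1) - (v2 - v1) * (x2 - u1)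
          if s3 * s4 ≥ 0 then pts
          else
            let den := (y1 - y2) * (u2 - u1) - (v1 - v2) * (x2 - x1)
            let b1 := x2 * y1 - x1 * y2
            let b2 := u2 * v1 - u1 * v2
            let xn := (u2 - u1) * b1 - (x2 - x1) * b2
            let yn := (y1 - y2) * b2 - (v1 - v2) * b1
            let fx := altCanonicalFraction xn den
            let fy := altCanonicalFraction yn den
            PySem.Set.add pts (fx.1, fx.2, fy.1, fy.2)) =
      (fun pts j =>
        if pyIsTrueIntersection (PySem.List.pyGetD lns i []) (PySem.List.pyGetD lns j []) = true then
          PySem.Set.add pts (ptKey (PySem.List.pyGetD lns i []) (PySem.List.pyGetD lns j []))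
        else pts) := by
    intro i
    funext pts j
    rw [test_eq]
    simp only [TI, ptKey, decide_eq_true_eq]
    by_cases h1 : ((PySem.List.pyGetD (PySem.List.pyGetD lns i []) 3 0 - PySem.List.pyGetD (PySem.List.pyGetD lns i []) 1 0) *
          (PySem.List.pyGetD (PySem.List.pyGetD lns j []) 2 0 - PySem.List.pyGetD (PySem.List.pyGetD lns i []) 2 0) -
        (PySem.List.pyGetD (PySem.List.pyGetD lns i []) 4 0 - PySem.List.pyGetD (PySem.List.pyGetD lns i []) 2 0) *
          (PySem.List.pyGetD (PySem.List.pyGetD lns j []) 1 0 - PySem.List.pyGetD (PySem.List.pyGetD lns i []) 1 0)) *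
        ((PySem.List.pyGetD (PySem.List.pyGetD lns i []) 3 0 - PySem.List.pyGetD (PySem.List.pyGetD lns i []) 1 0) *
          (PySem.List.pyGetD (PySem.List.pyGetD lns j []) 4 0 - PySem.List.pyGetD (PySem.List.pyGetD lns i []) 2 0) -
        (PySem.List.pyGetD (PySem.List.pyGetD lns i []) 4 0 - PySem.List.pyGetD (PySem.List.pyGetD lns i []) 2 0) *
          (PySem.List.pyGetD (PySem.List.pyGetD lns j []) 3 0 - PySem.List.pyGetD (PySem.List.pyGetD lns i []) 1 0)) ≥ 0
    · rw [if_pos h1, if_neg (by omega)]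
    · rw [if_neg h1]
      by_cases h2 : ((PySem.List.pyGetD (PySem.List.pyGetD lns j []) 3 0 - PySem.List.pyGetD (PySem.List.pyGetD lns j []) 1 0) *
            (PySem.List.pyGetD (PySem.List.pyGetD lns i []) 2 0 - PySem.List.pyGetD (PySem.List.pyGetD lns j []) 2 0) -
          (PySem.List.pyGetD (PySem.List.pyGetD lns j []) 4 0 - PySem.List.pyGetD (PySem.List.pyGetD lns j []) 2 0) *
            (PySem.List.pyGetD (PySem.List.pyGetD lns i []) 1 0 - PySem.List.pyGetD (PySem.List.pyGetD lns j []) 1 0)) *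
          ((PySem.List.pyGetD (PySem.List.pyGetD lns j []) 3 0 - PySem.List.pyGetD (PySem.List.pyGetD lns j []) 1 0) *
            (PySem.List.pyGetD (PySem.List.pyGetD lns i []) 4 0 - PySem.List.pyGetD (PySem.List.pyGetD lns j []) 2 0) -
          (PySem.List.pyGetD (PySem.List.pyGetD lns j []) 4 0 - PySem.List.pyGetD (PySem.List.pyGetD lns j []) 2 0) *
            (PySem.List.pyGetD (PySem.List.pyGetD lns i []) 3 0 - PySem.List.pyGetD (PySem.List.pyGetD lns j []) 1 0)) ≥ 0
      · rw [if_pos h2, if_neg (by omega)]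
      · rw [if_neg h2, if_pos (by constructor <;> omega)]
  simp only [hbody]
  have hstep : ∀ (i : Int) (s : PySem.Set (Int × Int × Int × Int)),
      (PySem.List.pyRange 0 i 1).foldl
        (fun pts j =>
          if pyIsTrueIntersection (PySem.List.pyGetD lns i []) (PySem.List.pyGetD lns j []) = true then
            PySem.Set.add pts (ptKey (PySem.List.pyGetD lns i []) (PySem.List.pyGetD lns j []))
          else pts) s
      = PySem.Set.update s
          (((PySem.List.pyRange 0 i 1).filter
              (fun j => pyIsTrueIntersection (PySem.List.pyGetD lns i []) (PySem.List.pyGetD lns j []))).map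
            (fun j => ptKey (PySem.List.pyGetD lns i []) (PySem.List.pyGetD lns j []))) :=
    fun i s => foldl_add_if _ _ _ _
  simp only [hstep]
  rw [foldl_update_flatMap]
  rw [PySem.Set.update_nil_left]
  simp only [pairsOf, List.map_flatMap, List.map_map]
  rfl

theorem mem_pairsOf_TI (lns : List (List Int)) (p : List Int × List Int) (hp : p ∈ pairsOf lns) :
    TI p.1 p.2 := by
  simp only [pairsOf, List.mem_flatMap, List.mem_map, List.mem_filter] at hp
  obtain ⟨i, -, j, ⟨-, hj⟩, rfl⟩ := hp
  rw [test_eq] at hj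
  exact of_decide_eq_true hj

-- ---- the counting argument: scan-after-sort counts the distinct elements ----

theorem pyGetD_cons_shift {α : Type} (x : α) (r : List α) (i : Int) (d : α) (h : 1 ≤ i) :
    PySem.List.pyGetD (x :: r) i d = PySem.List.pyGetD r (i - 1) d := by
  obtain ⟨n, rfl⟩ : ∃ n : Nat, i = (n : Int) + 1 := ⟨(i - 1).toNat, by omega⟩
  have h1 : ((n : Int) + 1) = ((n + 1 : Nat) : Int) := by push_cast; ring
  rw [h1, PySem.List.pyGetD_natCast]
  have h2 : ((n + 1 : Nat) : Int) - 1 = (n : Int) := by push_cast; ring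
  rw [h2, PySem.List.pyGetD_natCast]
  rfl

theorem countP_shift (q : Int → Bool) (a b : Int) :
    List.countP q (PySem.List.pyRange (a + 1) (b + 1) 1) =
      List.countP (fun i => q (i + 1)) (PySem.List.pyRange a b 1) := by
  have h : PySem.List.pyRange (a + 1) (b + 1) 1 = (PySem.List.pyRange a b 1).map (· + 1) := by
    rw [PySem.List.pyRange_one, PySem.List.pyRange_one]
    have he : (b + 1 - (a + 1)) = b - a := by ring
    rw [he, List.map_map]
    apply List.map_congr_left
    intro k _
    simp only [Function.comp_apply]
    ring
  rw [h, List.countP_map]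
  rfl

theorem countP_adj (K : List (List Int) → List (List Int) → Bool) :
    ∀ (r : List (List (List Int))) (x : List (List Int)),
      List.countP
          (fun i => K (PySem.List.pyGetD (x :: r) i []) (PySem.List.pyGetD (x :: r) (i - 1) []))
          (PySem.List.pyRange 1 (((x :: r).length : Nat) : Int) 1) = adjCount K x r := by
  intro r
  induction r with
  | nil =>
    intro x
    rw [PySem.List.pyRange_one_eq_nil (by simp)]
    rfl
  | cons y rs ih =>
    intro x
    have hlen : (((x :: y :: rs).length : Nat) : Int) = ((rs.length : Int) + 1) + 1 := by
      push_cast [List.length_cons]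
      ring
    rw [hlen, PySem.List.pyRange_one_cons (by omega)]
    rw [List.countP_cons]
    have hone : K (PySem.List.pyGetD (x :: y :: rs) 1 [])
        (PySem.List.pyGetD (x :: y :: rs) (1 - 1) []) = K y x := by
      norm_num [PySem.List.pyGetD_ofNat']
    rw [countP_shift]
    have hcong : List.countP
        (fun i => K (PySem.List.pyGetD (x :: y :: rs) (i + 1) []) (PySem.List.pyGetD (x :: y :: rs) (i + 1 - 1) []))
        (PySem.List.pyRange 1 ((rs.length : Int) + 1) 1)
        = List.countP
        (fun i => K (PySem.List.pyGetD (y :: rs) i []) (PySem.List.pyGetD (y :: rs) (i - 1) []))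
        (PySem.List.pyRange 1 ((rs.length : Int) + 1) 1) := by
      apply List.countP_congr
      intro i hi
      have h1i : 1 ≤ i := (PySem.List.mem_pyRange_one.mp hi).1
      have e1 : PySem.List.pyGetD (x :: y :: rs) (i + 1) [] = PySem.List.pyGetD (y :: rs) i [] := by
        rw [pyGetD_cons_shift _ _ _ _ (by omega)]
        norm_num
      have e2 : PySem.List.pyGetD (x :: y :: rs) (i + 1 - 1) [] = PySem.List.pyGetD (y :: rs) (i - 1) [] := by
        have : i + 1 - 1 = i := by ring
        rw [this, pyGetD_cons_shift _ _ _ _ (by omega)]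
      rw [e1, e2]
    rw [hcong]
    have hlen2 : ((rs.length : Int) + 1) = (((y :: rs).length : Nat) : Int) := by simp
    rw [hlen2, ih y, hone]
    simp [adjCount]
    omega

theorem adj_card (K : List (List Int) → List (List Int) → Bool) :
    ∀ (r : List (List (List Int))) (x : List (List Int)),
      (x :: r).Pairwise (· ≤ ·) →
      (∀ a ∈ x :: r, ∀ b ∈ x :: r, (K a b = true ↔ a ≠ b)) →
      1 + adjCount K x r = (x :: r).toFinset.card := by
  intro r
  induction r with
  | nil => intro x _ _; simp [adjCount]
  | cons y rs ih =>
    intro x hp hK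
    have hp' : (y :: rs).Pairwise (· ≤ ·) := hp.of_cons
    have hxy : x ≤ y := (List.pairwise_cons.mp hp).1 y (by simp)
    have hK' : ∀ a ∈ y :: rs, ∀ b ∈ y :: rs, (K a b = true ↔ a ≠ b) := by
      intro a ha b hb
      exact hK a (List.mem_cons_of_mem _ ha) b (List.mem_cons_of_mem _ hb)
    rcases eq_or_ne x y with rfl | hne
    · have hKxx : K x x = false := by
        have h := hK x (by simp) x (by simp)
        simp only [ne_eq, not_true, iff_false, Bool.not_eq_true] at h
        exact h
      rw [show adjCount K x (x :: rs) = adjCount K x rs from by simp [adjCount, hKxx]]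
      rw [ih x hp' hK']
      simp [List.toFinset_cons]
    · have hKyx : K y x = true := by
        exact (hK y (by simp) x (by simp)).mpr (Ne.symm hne)
      have hxnot : x ∉ y :: rs := by
        intro hx
        rcases List.mem_cons.mp hx with h | h
        · exact hne h
        · have hyx : y ≤ x := (List.pairwise_cons.mp hp').1 x h
          exact hne (le_antisymm hxy hyx)
      have hcard : (x :: y :: rs).toFinset.card = (y :: rs).toFinset.card + 1 := by
        rw [List.toFinset_cons, Finset.card_insert_of_notMem (by simpa using hxnot)]
      rw [hcard, ← ih y hp' hK']
      simp [adjCount, hKyx]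
      omega

theorem list_toFinset_map (l : List (Int × Int × Int × Int)) :
    (l.map injPt).toFinset = l.toFinset.image injPt := by
  induction l with
  | nil => simp
  | cons x xs ih => simp [ih]

theorem delete_count (st : List (List (List Int))) (hne : st ≠ [])
    (hc : ∀ v ∈ st, IsCanon v) :
    (pyDeleteCopiesRationalPoints st).length = st.toFinset.card := by
  simp only [pyDeleteCopiesRationalPoints, if_neg hne]
  have hperm : (PySem.List.sorted st (fun x => x) false).Perm st := PySem.List.sorted_perm st _ _
  have hpair : (PySem.List.sorted st (fun x => x) false).Pairwise (· ≤ ·) := by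
    have h := @PySem.List.sorted_pairwise (List (List Int)) (List (List Int)) _ st (fun x => x)
    convert h using 2
  obtain ⟨z, zs, htz⟩ : ∃ z zs, PySem.List.sorted st (fun x => x) false = z :: zs := by
    rcases hsort : PySem.List.sorted st (fun x => x) false with _ | ⟨z, zs⟩
    · exact absurd ((PySem.List.sorted_eq_nil_iff st _ _).mp hsort) hne
    · exact ⟨z, zs, rfl⟩
  rw [htz] at hperm hpair ⊢
  rw [PySem.List.foldl_append_if]
  rw [List.length_append, List.length_map, List.length_cons, List.length_nil]
  rw [← List.countP_eq_length_filter]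
  rw [countP_adj]
  have hK : ∀ a ∈ z :: zs, ∀ b ∈ z :: zs, (crossNe a b = true ↔ a ≠ b) := by
    intro a ha b hb
    exact crossNe_iff (hc a (hperm.mem_iff.mp ha)) (hc b (hperm.mem_iff.mp hb))
  have hcard := adj_card crossNe zs z hpair hK
  rw [List.toFinset_eq_of_perm _ _ hperm] at hcard
  omega

-- ===== VERDICT (by name: the statement is the Claim_ definition above) =====
theorem CountTrueIntersections_spec : Claim_equal_CountTrueIntersections := by
  intro lns _hdom _hpre
  unfold Spec_CountTrueIntersections
  rw [A_ans_eq, B_pts_eq]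
  have hmap : (pairsOf lns).map (fun p => pyIntersectionPoint p.1 p.2) =
      ((pairsOf lns).map (fun p => ptKey p.1 p.2)).map injPt := by
    rw [List.map_map]
    apply List.map_congr_left
    intro p hp
    exact point_eq p.1 p.2 (mem_pairsOf_TI lns p hp)
  rw [hmap]
  set ks := (pairsOf lns).map (fun p => ptKey p.1 p.2) with hks
  rcases eq_or_ne ks [] with hnil | hnil
  · rw [hnil]
    simp [pyDeleteCopiesRationalPoints, PySem.Set.len, PySem.Set.ofList]
  · have hcanon : ∀ v ∈ ks.map injPt, IsCanon v := by
      intro v hv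
      obtain ⟨k, hk, rfl⟩ := List.mem_map.mp hv
      rw [hks] at hk
      obtain ⟨p, hp, rfl⟩ := List.mem_map.mp hk
      exact point_canon p.1 p.2 (mem_pairsOf_TI lns p hp)
    rw [delete_count _ (by simpa using hnil) hcanon]
    rw [list_toFinset_map]
    rw [Finset.card_image_of_injective _ injPt_injective]
    have h1 : (PySem.Set.ofList ks).toFinset = ks.toFinset := by
      ext v
      simp [List.mem_toFinset, PySem.Set.mem_ofList]
    have h2 : (PySem.Set.ofList ks).length = (PySem.Set.ofList ks).toFinset.card :=
      (List.toFinset_card_of_nodup (PySem.Set.nodup_ofList ks)).symm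
    simp [PySem.Set.len, h2, h1]
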